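-- pv_equiv track=rewrite | github.com/HaseebLUMS/networksSecurityProject | Acquisitional Rule Based Engine/NER_with_local_dependencies.py | all_indices
-- ===== SOURCE A (Python) =====
-- def all_indices(token, text):
-- 	ans = [-1]
-- 	index = 0
-- 	for ind, ele in enumerate(text.split(" ")):
-- 		index += len(ele)
-- 		if token.lower() == ele.lower():
-- 			ans.append(index)
-- 		index += 1
-- 	return ans
-- ===== SOURCE B (Python) =====
-- def all_indices(token, text):
--     # Whole-word substring search: no split at all. Scan every character position
--     # of the lowercased text and test "a word equal to token starts here" by a
--     # direct slice comparison with boundary checks (preceded by start-or-space,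
--     # followed by end-or-space). A token containing a space is never a single
--     # word, so it has no occurrences.
--     if " " in token:
--         return [-1]
--     t = token.lower()
--     low = text.lower()
--     n = len(low)
--     m = len(t)
--     ans = [-1]
--     for i in range(n + 1):
--         if (i == 0 or low[i - 1] == " ") and low[i:i + m] == t \
--                 and (i + m == n or low[i + m] == " "):
--             ans.append(i + m)
--     return ans
-- ===== Notes on version B (the rewrite author's own statement) =====
-- stated objective: alternative
-- what changed: A splits the text on spaces and accumulates word-end offsets in one fused loop; B never splits: it scans every character position of the lowercased text and does a direct whole-word substring match (slice comparison plus start/space and end/space boundary checks), with a token containing a space having no occurrences by definition.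
import Mathlib
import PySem

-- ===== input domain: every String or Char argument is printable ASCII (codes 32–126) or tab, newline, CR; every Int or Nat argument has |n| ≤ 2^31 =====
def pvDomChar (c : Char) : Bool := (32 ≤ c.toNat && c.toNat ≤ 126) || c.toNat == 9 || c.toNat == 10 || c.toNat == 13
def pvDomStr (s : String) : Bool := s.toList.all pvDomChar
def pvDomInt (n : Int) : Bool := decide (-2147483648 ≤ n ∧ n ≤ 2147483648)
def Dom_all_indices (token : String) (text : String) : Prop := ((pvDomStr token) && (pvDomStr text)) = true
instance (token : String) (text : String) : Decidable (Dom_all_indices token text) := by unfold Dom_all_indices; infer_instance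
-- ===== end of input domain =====

-- B replaces A's split-and-accumulate loop by a whole-word substring search over the
-- lowercased text (slice comparison with boundary checks); objective: alternative, same result.

-- ===== PORT A =====
-- A: split on " ", one fused loop accumulating a running char index, matches appended in place.
def all_indices (token : String) (text : String) : List Int :=
  ((PySem.Chars.splitOn text.toList [' ']).foldl
    (fun (st : List Int × Int) ele =>
      let index := st.2 + (ele.length : Int)
      let ans := if PySem.Chars.lower token.toList == PySem.Chars.lower ele then st.1 ++ [index] else st.1
      (ans, index + 1))
    ([-1], 0)).1

-- ===== PORT B =====
-- B: no split; scan every position i of the lowercased text and test "token occurs as a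
-- whole word here" by a slice comparison plus start/space and end/space boundary checks.
-- The pyGet? looks are only consulted when Python's short-circuit guards guarantee the
-- index is in range, so the `none` (IndexError) case is unreachable, as in Source B.
def all_indices_alt (token : String) (text : String) : List Int :=
  if PySem.Str.isIn " " token then [-1]
  else
    let t := PySem.Chars.lower token.toList
    let low := PySem.Chars.lower text.toList
    let n : Int := low.length
    let m : Int := t.length
    (PySem.List.pyRange 0 (n + 1) 1).foldl
      (fun ans i =>
        if ((i == 0) || (PySem.List.pyGet? low (i - 1) == some ' '))
            && (PySem.List.slice low (some i) (some (i + m)) == t)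
            && ((i + m == n) || (PySem.List.pyGet? low (i + m) == some ' '))
        then ans ++ [i + m] else ans)
      [-1]

-- ===== PRECONDITION & SPEC =====
def Spec_all_indices (token : String) (text : String) (out : List Int) : Prop := out = all_indices_alt token text
instance (token : String) (text : String) (out : List Int) : Decidable (Spec_all_indices token text out) := by unfold Spec_all_indices; infer_instance

-- ===== CLAIM (what is proved, stated in full; the proofs are below) =====
def Claim_equal_all_indices : Prop := ∀ (token : String) (text : String), Dom_all_indices token text → Spec_all_indices token text (all_indices token text)

-- ===== LEMMAS AND PROOFS =====

-- the common specification: end positions of the words equal to t, words listed with start offset i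
def pvWordEnds (t : List Char) : List (List Char) → Int → List Int
  | [], _ => []
  | w :: ws, i => (if t == w then [i + (w.length : Int)] else []) ++ pvWordEnds t ws (i + (w.length : Int) + 1)

-- B's boundary test, abstracted from the port's loop body
def pvCond (t L : List Char) (i : Int) : Bool :=
  ((i == 0) || (PySem.List.pyGet? L (i - 1) == some ' '))
    && (PySem.List.slice L (some i) (some (i + (t.length : Int))) == t)
    && ((i + (t.length : Int) == (L.length : Int)) || (PySem.List.pyGet? L (i + (t.length : Int)) == some ' '))

-- "does a word end right after the next t.length characters?"
def pvEndOk (t L : List Char) : Bool :=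
  match L.drop t.length with
  | [] => true
  | c :: _ => c == ' '

-- recursive form of B's scan: prev = "previous character is a boundary"
def pvScan (t : List Char) (prev : Bool) : List Char → Int → List Int
  | [], pos => if prev && t.isPrefixOf ([] : List Char) && pvEndOk t [] then [pos + (t.length : Int)] else []
  | c :: rest, pos =>
      (if prev && t.isPrefixOf (c :: rest) && pvEndOk t (c :: rest) then [pos + (t.length : Int)] else [])
        ++ pvScan t (c == ' ') rest (pos + 1)

-- ---------- A-side ----------

lemma lower_length (w : List Char) : (PySem.Chars.lower w).length = w.length := by
  simp [PySem.Chars.lower]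

lemma loopA (t : List Char) (ws : List (List Char)) (ans : List Int) (i : Int) :
    (ws.foldl
      (fun (st : List Int × Int) ele =>
        ((if t == PySem.Chars.lower ele then st.1 ++ [st.2 + (ele.length : Int)] else st.1),
          st.2 + (ele.length : Int) + 1)) (ans, i)).1
      = ans ++ pvWordEnds t (ws.map PySem.Chars.lower) i := by
  induction ws generalizing ans i with
  | nil => simp [pvWordEnds]
  | cons w ws ih =>
      simp only [List.foldl_cons, List.map_cons, pvWordEnds, lower_length]
      cases h : (t == PySem.Chars.lower w)
      · simp only [h, Bool.false_eq_true, if_neg, ite_false, List.nil_append]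
        exact ih ans (i + (w.length : Int) + 1)
      · simp only [h, ite_true]
        rw [ih (ans ++ [i + (w.length : Int)]) (i + (w.length : Int) + 1)]
        simp [List.append_assoc]

-- PySem's fuel-based splitOn with a one-character separator is Mathlib's List.splitOn
lemma go_single (d : Char) : ∀ (fuel : Nat) (l cur : List Char) (acc : List (List Char)),
    l.length < fuel →
    PySem.Chars.splitOn.go [d] fuel l cur acc
      = acc.reverse ++ (List.splitOn d l).modifyHead (cur.reverse ++ ·) := by
  intro fuel
  induction fuel with
  | zero => intro l cur acc h; omega
  | succ fuel ih =>
      intro l cur acc h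
      cases l with
      | nil =>
          rw [PySem.Chars.splitOn.go]
          · simp [List.splitOn, List.splitOnP_nil]
          · omega
      | cons c rest =>
          rw [PySem.Chars.splitOn.go]
          obtain ⟨w, ws, hw⟩ : ∃ w ws, List.splitOn d rest = w :: ws := by
            cases h' : List.splitOn d rest with
            | nil => exact absurd h' (List.splitOnP_ne_nil _ _)
            | cons a b => exact ⟨a, b, rfl⟩
          have hw' : List.splitOnP (fun x => x == d) rest = w :: ws := hw
          by_cases hc : d = c
          · subst hc
            simp only [List.isPrefixOf, BEq.rfl, Bool.true_and, List.isPrefixOf_nil_left, if_true,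
              List.length_cons, List.length_nil, List.drop_succ_cons, List.drop_zero]
            rw [ih rest [] (cur.reverse :: acc) (by simpa using Nat.lt_of_succ_lt_succ h)]
            simp [List.splitOn, List.splitOnP_cons, hw', List.modifyHead]
          · have hdc : (d == c) = false := by simp [hc]
            have hcd : (c == d) = false := by simp [Ne.symm hc]
            simp only [List.isPrefixOf, hdc, Bool.false_and, if_false]
            rw [ih rest (c :: cur) acc (by simpa using Nat.lt_of_succ_lt_succ h)]
            simp [List.splitOn, List.splitOnP_cons, hcd, hw', List.modifyHead]

lemma chars_splitOn_single (d : Char) (s : List Char) :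
    PySem.Chars.splitOn s [d] = List.splitOn d s := by
  show PySem.Chars.splitOn.go [d] (s.length + 1) s [] [] = _
  rw [go_single d (s.length + 1) s [] [] (by omega)]
  obtain ⟨w, ws, hw⟩ : ∃ w ws, List.splitOn d s = w :: ws := by
    cases h' : List.splitOn d s with
    | nil => exact absurd h' (List.splitOnP_ne_nil _ _)
    | cons a b => exact ⟨a, b, rfl⟩
  simp [hw]

-- lowering commutes with splitting on ' '
lemma lowerChar_space (c : Char) : (PySem.Chars.lowerChar c = ' ') ↔ (c = ' ') := by
  constructor
  · intro h
    unfold PySem.Chars.lowerChar at h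
    split_ifs at h with hu
    · exfalso
      have hb : 'A' ≤ c ∧ c ≤ 'Z' := by simpa [PySem.Chars.isupper] using hu
      have h1 : 65 ≤ c.toNat := UInt32.le_iff_toNat_le.mp hb.1
      have h2 : c.toNat ≤ 90 := UInt32.le_iff_toNat_le.mp hb.2
      have hv : (c.toNat + 32).isValidChar := Or.inl (by omega)
      have := congrArg Char.toNat h
      rw [Char.toNat_ofNat, if_pos hv] at this
      rw [show (' ').toNat = 32 from rfl] at this
      omega
    · exact h
  · intro h; subst h; decide

lemma lower_cons (c : Char) (s : List Char) :
    PySem.Chars.lower (c :: s) = PySem.Chars.lowerChar c :: PySem.Chars.lower s := rfl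

lemma splitOn_space_cons (c : Char) (l : List Char) :
    List.splitOn ' ' (c :: l)
      = if c = ' ' then [] :: List.splitOn ' ' l
        else (List.splitOn ' ' l).modifyHead (c :: ·) := by
  by_cases hc : c = ' ' <;> simp [List.splitOn, List.splitOnP_cons, hc]

lemma map_lower_modifyHead (c : Char) (ws : List (List Char)) :
    (ws.modifyHead (c :: ·)).map PySem.Chars.lower
      = (ws.map PySem.Chars.lower).modifyHead (PySem.Chars.lowerChar c :: ·) := by
  cases ws <;> simp [PySem.Chars.lower]

lemma lower_splitOn (s : List Char) :
    List.splitOn ' ' (PySem.Chars.lower s) = (List.splitOn ' ' s).map PySem.Chars.lower := by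
  induction s with
  | nil => simp [PySem.Chars.lower, List.splitOn, List.splitOnP_nil]
  | cons c s ih =>
      rw [lower_cons, splitOn_space_cons, splitOn_space_cons]
      have ih' : List.splitOn ' ' (List.map PySem.Chars.lowerChar s)
          = (List.splitOn ' ' s).map PySem.Chars.lower := by
        simpa [PySem.Chars.lower] using ih
      by_cases hc : c = ' '
      · subst hc
        have h2 : PySem.Chars.lowerChar ' ' = ' ' := by decide
        simp [h2, ih', PySem.Chars.lower]
      · have h2 : ¬ (PySem.Chars.lowerChar c = ' ') := fun h => hc ((lowerChar_space c).mp h)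
        simp [h2, hc, ih', map_lower_modifyHead, PySem.Chars.lower]

-- words produced by splitOn contain no separator
lemma splitOn_eq_cons (L : List Char) :
    List.splitOn ' ' L = L.takeWhile (· ≠ ' ') :: (List.splitOn ' ' L).tail := by
  induction L with
  | nil => simp [List.splitOn, List.splitOnP_nil]
  | cons c L ih =>
      rw [splitOn_space_cons]
      by_cases hc : c = ' '
      · simp [hc]
      · rw [if_neg hc]
        conv_lhs => rw [ih]
        simp [List.takeWhile_cons, hc]

lemma not_mem_splitOn (L : List Char) : ∀ w ∈ List.splitOn ' ' L, ' ' ∉ w := by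
  induction L with
  | nil => intro w hw; simp [List.splitOn, List.splitOnP_nil] at hw; simp [hw]
  | cons c L ih =>
      intro w hw
      rw [splitOn_space_cons] at hw
      by_cases hc : c = ' '
      · rw [if_pos hc] at hw
        rcases List.mem_cons.mp hw with h | h
        · simp [h]
        · exact ih w h
      · rw [if_neg hc] at hw
        rw [splitOn_eq_cons L] at hw
        simp only [List.modifyHead_cons] at hw
        rcases List.mem_cons.mp hw with h | h
        · subst h
          intro hmem
          rcases List.mem_cons.mp hmem with h' | h'
          · exact hc h'.symm
          · exact ih _ (by rw [splitOn_eq_cons L]; exact List.mem_cons_self) h'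
        · exact ih w (by rw [splitOn_eq_cons L]; exact List.mem_cons_of_mem _ h)

lemma pvWordEnds_nil (t : List Char) (ws : List (List Char)) (i : Int)
    (h : ∀ w ∈ ws, t ≠ w) : pvWordEnds t ws i = [] := by
  induction ws generalizing i with
  | nil => rfl
  | cons w ws ih =>
      have h1 : (t == w) = false := by simp [h w List.mem_cons_self]
      simp [pvWordEnds, h1,
        ih (i + (w.length : Int) + 1) (fun w hw => h w (List.mem_cons_of_mem _ hw))]

-- ---------- B-side ----------

lemma fold_if_append (p : Int → Bool) (f : Int → Int) (l : List Int) (acc : List Int) :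
    l.foldl (fun a i => if p i then a ++ [f i] else a) acc = acc ++ (l.filter p).map f := by
  induction l generalizing acc with
  | nil => simp
  | cons x xs ih => by_cases h : p x <;> simp [h, ih]

-- the take/prefix bridge
lemma takeEq_isPrefixOf (t d : List Char) : ((d.take t.length) == t) = t.isPrefixOf d := by
  by_cases h : t <+: d
  · have h1 : d.take t.length = t := (List.prefix_iff_eq_take.mp h).symm
    simp [h1, List.isPrefixOf_iff_prefix, h]
  · have h1 : d.take t.length ≠ t := fun he => h (by rw [← he]; exact List.take_prefix _ _)
    have h2 : ((d.take t.length) == t) = false := by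
      rw [beq_eq_false_iff_ne]; exact h1
    have h3 : t.isPrefixOf d = false := by
      rw [Bool.eq_false_iff]
      intro hT
      exact h (List.isPrefixOf_iff_prefix.mp hT)
    rw [h2, h3]

-- pointwise: B's test at position j is the scanner's head test on the suffix
lemma cond_at (t L : List Char) (j : Nat) (hj : j ≤ L.length) :
    pvCond t L (j : Int)
      = (((j : Int) == 0 || (PySem.List.pyGet? L ((j : Int) - 1) == some ' '))
          && t.isPrefixOf (L.drop j) && pvEndOk t (L.drop j)) := by
  unfold pvCond
  have hslice : PySem.List.slice L (some (j : Int)) (some ((j : Int) + (t.length : Int)))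
      = (L.drop j).take t.length := by
    rw [show (j : Int) + (t.length : Int) = ((j + t.length : Nat) : Int) by push_cast; ring]
    rw [PySem.List.slice_natCast]
    congr 1
    omega
  rw [hslice, takeEq_isPrefixOf]
  cases hb : t.isPrefixOf (L.drop j) with
  | false => simp [hb]
  | true =>
      have hpre : t <+: L.drop j := List.isPrefixOf_iff_prefix.mp hb
      have hlen : j + t.length ≤ L.length := by
        have h1 := hpre.length_le
        rw [List.length_drop] at h1
        omega
      have hdd : (L.drop j).drop t.length = L.drop (j + t.length) := by
        rw [List.drop_drop, Nat.add_comm]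
      have hEC : ((j : Int) + (t.length : Int) == (L.length : Int)
            || (PySem.List.pyGet? L ((j : Int) + (t.length : Int)) == some ' '))
          = pvEndOk t (L.drop j) := by
        unfold pvEndOk
        rcases Nat.lt_or_ge (j + t.length) L.length with hlt | hge
        · have hcons : L.drop (j + t.length) = L[j + t.length] :: L.drop (j + t.length + 1) :=
            List.drop_eq_getElem_cons (by omega)
          rw [hdd, hcons]
          have hne : ((j : Int) + (t.length : Int)) ≠ ((L.length : Int)) := by push_cast; omega
          have h1 : ((j : Int) + (t.length : Int) == (L.length : Int)) = false := by
            simp [hne]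
          have h2 : PySem.List.pyGet? L ((j : Int) + (t.length : Int)) = some L[j + t.length] := by
            rw [show (j : Int) + (t.length : Int) = ((j + t.length : Nat) : Int) by push_cast; ring,
              PySem.List.pyGet?_natCast, List.getElem?_eq_getElem (by omega)]
          rw [h1, h2]
          simp
        · have heq : j + t.length = L.length := le_antisymm hlen hge
          have hnil : L.drop (j + t.length) = [] := by
            rw [List.drop_eq_nil_iff]
            omega
          rw [hdd, hnil]
          have h1 : ((j : Int) + (t.length : Int) == (L.length : Int)) = true := by
            rw [beq_iff_eq]; push_cast; omega
          rw [h1]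
          simp
      rw [hEC]

-- B's filtered range scan is the recursive scanner
lemma scan_range (t L : List Char) : ∀ (d : List Char) (j : Nat), L.drop j = d → j ≤ L.length →
    ((PySem.List.pyRange (j : Int) ((L.length : Int) + 1) 1).filter (pvCond t L)).map
        (fun i => i + (t.length : Int))
      = pvScan t ((j : Int) == 0 || (PySem.List.pyGet? L ((j : Int) - 1) == some ' ')) d (j : Int) := by
  intro d
  induction d with
  | nil =>
      intro j hd hj
      have hjl : j = L.length := by
        have := congrArg List.length hd
        simp at this
        omega
      have hr : PySem.List.pyRange (j : Int) ((L.length : Int) + 1) 1 = [(j : Int)] := by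
        rw [show ((L.length : Int) + 1) = (j : Int) + 1 by rw [hjl]]
        exact PySem.List.pyRange_one_singleton _
      rw [hr]
      simp only [List.filter_cons, List.filter_nil]
      rw [cond_at t L j hj, hd]
      cases hc : (((j : Int) == 0 || (PySem.List.pyGet? L ((j : Int) - 1) == some ' '))
          && t.isPrefixOf ([] : List Char) && pvEndOk t ([] : List Char)) <;>
        cases hflag : ((j : Int) == 0 || (PySem.List.pyGet? L ((j : Int) - 1) == some ' ')) <;>
          simp_all [pvScan, pvEndOk, List.filter_cons]
  | cons c d ih =>
      intro j hd hj
      have hjlt : j < L.length := by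
        by_contra hge
        rw [List.drop_eq_nil_iff.mpr (by omega)] at hd
        simp at hd
      have hdnext : L.drop (j + 1) = d := by
        have h1 : L.drop (j + 1) = List.drop 1 (L.drop j) := List.drop_drop.symm
        rw [h1, hd]
        rfl
      have hgetj : L[j] = c := by
        have := List.drop_eq_getElem_cons (l := L) (i := j) hjlt
        rw [hd] at this
        exact (List.cons.injEq _ _ _ _ ▸ this).1.symm
      have hrange : PySem.List.pyRange (j : Int) ((L.length : Int) + 1) 1
          = (j : Int) :: PySem.List.pyRange ((j : Int) + 1) ((L.length : Int) + 1) 1 := by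
        exact PySem.List.pyRange_one_cons (by push_cast; omega)
      rw [hrange, List.filter_cons]
      have hih := ih (j + 1) hdnext (by omega)
      have hcast : (((j + 1 : Nat) : Int)) = (j : Int) + 1 := by push_cast; ring
      rw [hcast] at hih
      have hflag1 : (((j : Int) + 1 == 0 || (PySem.List.pyGet? L ((j : Int) + 1 - 1) == some ' ')))
          = (c == ' ') := by
        have hz : ((j : Int) + 1 == 0) = false := by
          simp [show (j : Int) + 1 ≠ 0 by omega]
        have hg : PySem.List.pyGet? L ((j : Int) + 1 - 1) = some c := by
          rw [show (j : Int) + 1 - 1 = ((j : Nat) : Int) by ring, PySem.List.pyGet?_natCast,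
            List.getElem?_eq_getElem hjlt, hgetj]
        rw [hz, hg]
        simp
      rw [hflag1] at hih
      rw [cond_at t L j (by omega), hd]
      cases hc : (((j : Int) == 0 || (PySem.List.pyGet? L ((j : Int) - 1) == some ' '))
          && t.isPrefixOf (c :: d) && pvEndOk t (c :: d)) <;>
        cases hflag : ((j : Int) == 0 || (PySem.List.pyGet? L ((j : Int) - 1) == some ' ')) <;>
          simp_all [pvScan]

-- a space-free t that occurs at a word start and ends at a boundary IS the word
lemma prefix_word (t : List Char) (ht : ' ' ∉ t) : ∀ rest, t <+: rest →
    pvEndOk t rest = true → t = rest.takeWhile (· ≠ ' ') := by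
  induction t with
  | nil =>
      intro rest _ hE
      cases rest with
      | nil => rfl
      | cons c r =>
          have hc : c = ' ' := by simpa [pvEndOk] using hE
          subst hc
          simp [List.takeWhile_cons]
  | cons a t ih =>
      intro rest hpre hE
      cases rest with
      | nil => exact absurd hpre.length_le (by simp)
      | cons b r =>
          obtain ⟨hab, hpre'⟩ := List.cons_prefix_cons.mp hpre
          subst hab
          have ha : a ≠ ' ' := fun h => ht (h ▸ List.mem_cons_self)
          have ht' : ' ' ∉ t := fun h => ht (List.mem_cons_of_mem _ h)
          have hE' : pvEndOk t r = true := by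
            simpa [pvEndOk, List.drop_succ_cons] using hE
          rw [List.takeWhile_cons, if_pos (by simpa using ha)]
          rw [← ih ht' r hpre' hE']

-- the scanner finds exactly the word-end positions
lemma scan_words (t : List Char) (ht : ' ' ∉ t) : ∀ (L : List Char) (pos : Int),
    pvScan t true L pos = pvWordEnds t (List.splitOn ' ' L) pos ∧
    pvScan t false L pos
      = pvWordEnds t (List.splitOn ' ' L).tail (pos + ((L.takeWhile (· ≠ ' ')).length : Int) + 1) := by
  intro L
  induction L with
  | nil =>
      intro pos
      constructor
      · cases t with
        | nil => simp [pvScan, pvEndOk, pvWordEnds, List.splitOn, List.splitOnP_nil]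
        | cons a t => simp [pvScan, pvEndOk, pvWordEnds, List.splitOn, List.splitOnP_nil,
            List.isPrefixOf]
      · simp [pvScan, pvWordEnds, List.splitOn, List.splitOnP_nil]
  | cons c L ih =>
      intro pos
      by_cases hc : c = ' '
      · subst hc
        have hsp : List.splitOn ' ' (' ' :: L) = [] :: List.splitOn ' ' L := by
          rw [splitOn_space_cons]; simp
        have hhead : (true && t.isPrefixOf (' ' :: L) && pvEndOk t (' ' :: L))
            = (t == []) := by
          cases t with
          | nil => simp [pvEndOk, List.isPrefixOf]
          | cons a t' =>
              have ha : a ≠ ' ' := fun h => ht (h ▸ List.mem_cons_self)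
              have ha' : (a == ' ') = false := by simpa using ha
              simp [List.isPrefixOf, ha']
        constructor
        · rw [show pvScan t true (' ' :: L) pos
              = (if true && t.isPrefixOf (' ' :: L) && pvEndOk t (' ' :: L)
                  then [pos + (t.length : Int)] else [])
                ++ pvScan t (' ' == ' ') L (pos + 1) from rfl]
          rw [hhead, hsp]
          have h1 : (' ' == ' ') = true := by decide
          rw [h1, (ih (pos + 1)).1]
          cases hT : (t == ([] : List Char))
          · simp [pvWordEnds, hT, BEq.comm (a := t)]
          · have : t = [] := by simpa using hT
            subst this
            simp [pvWordEnds]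
        · rw [show pvScan t false (' ' :: L) pos
              = ([] : List Int) ++ pvScan t (' ' == ' ') L (pos + 1) from by simp [pvScan]]
          have h1 : (' ' == ' ') = true := by decide
          rw [h1, (ih (pos + 1)).1, hsp]
          simp
      · -- c ≠ ' '
        obtain ⟨w, tl, hw, htw⟩ : ∃ w tl, List.splitOn ' ' L = w :: tl
            ∧ w = L.takeWhile (· ≠ ' ') := ⟨_, _, splitOn_eq_cons L, rfl⟩
        have hsp : List.splitOn ' ' (c :: L) = (c :: w) :: tl := by
          rw [splitOn_space_cons, if_neg hc, hw]
          rfl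
        have htwc : (c :: L).takeWhile (· ≠ ' ') = c :: w := by
          rw [List.takeWhile_cons, if_pos (by simpa using hc), htw]
        have hrec : pvScan t (c == ' ') L (pos + 1)
            = pvWordEnds t tl (pos + ((c :: w).length : Int) + 1) := by
          have hcb : (c == ' ') = false := by simpa using hc
          rw [hcb, (ih (pos + 1)).2, hw, htw]
          have : (pos + 1) + ((L.takeWhile (· ≠ ' ')).length : Int) + 1
              = pos + (((c :: L.takeWhile (· ≠ ' ')).length : Int)) + 1 := by
            simp only [List.length_cons]
            push_cast
            ring
          rw [this]
          rfl
        have hhead : (true && t.isPrefixOf (c :: L) && pvEndOk t (c :: L))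
            = (t == c :: w) := by
          cases hT : (t == c :: w)
          · have hTne : t ≠ c :: w := by simpa using hT
            simp only [Bool.true_and]
            rw [Bool.eq_false_iff]
            intro hand
            obtain ⟨h1, h2⟩ := Bool.and_eq_true_iff.mp hand
            exact hTne (by
              have := prefix_word t ht (c :: L) (List.isPrefixOf_iff_prefix.mp h1) h2
              rw [this, htwc])
          · have hTeq : t = c :: w := by simpa using hT
            subst hTeq
            simp only [Bool.true_and]
            apply Bool.and_eq_true_iff.mpr
            constructor
            · apply List.isPrefixOf_iff_prefix.mpr
              apply List.cons_prefix_cons.mpr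
              exact ⟨rfl, htw ▸ List.takeWhile_prefix _⟩
            · -- pvEndOk (c :: w) (c :: L): after the word comes nothing or a space
              have hdrop : (c :: L).drop (c :: w).length = L.drop w.length := by
                simp
              have hdw : L.drop w.length = L.dropWhile (· ≠ ' ') := by
                conv_lhs => rw [← List.takeWhile_append_dropWhile (p := (· ≠ ' ')) (l := L), ← htw]
                rw [List.drop_left]
              unfold pvEndOk
              rw [hdrop, hdw]
              cases hD : L.dropWhile (· ≠ ' ') with
              | nil => rfl
              | cons x xs =>
                  have := List.head?_dropWhile_not (fun ch => decide (ch ≠ ' ')) L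
                  rw [hD] at this
                  simp at this
                  simpa using this
        constructor
        · rw [show pvScan t true (c :: L) pos
              = (if true && t.isPrefixOf (c :: L) && pvEndOk t (c :: L)
                  then [pos + (t.length : Int)] else [])
                ++ pvScan t (c == ' ') L (pos + 1) from rfl]
          rw [hhead, hrec, hsp]
          cases hT : (t == c :: w)
          · simp [pvWordEnds, hT]
          · have hTeq : t = c :: w := by simpa using hT
            simp [pvWordEnds, hTeq]
        · rw [show pvScan t false (c :: L) pos
              = ([] : List Int) ++ pvScan t (c == ' ') L (pos + 1) from by simp [pvScan]]
          rw [hrec, hsp, htwc]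
          rfl

-- ---------- assembly ----------

lemma all_indices_eq (token text : String) :
    all_indices token text
      = -1 :: pvWordEnds (PySem.Chars.lower token.toList)
          (List.splitOn ' ' (PySem.Chars.lower text.toList)) 0 := by
  unfold all_indices
  rw [chars_splitOn_single]
  have h := loopA (PySem.Chars.lower token.toList) (List.splitOn ' ' text.toList) [-1] 0
  rw [← lower_splitOn] at h
  exact h

lemma all_indices_alt_eq (token text : String)
    (hin : PySem.Str.isIn " " token = false)
    (ht : ' ' ∉ PySem.Chars.lower token.toList) :
    all_indices_alt token text
      = -1 :: pvWordEnds (PySem.Chars.lower token.toList)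
          (List.splitOn ' ' (PySem.Chars.lower text.toList)) 0 := by
  unfold all_indices_alt
  rw [if_neg (by intro h; rw [hin] at h; exact Bool.noConfusion h)]
  calc ((PySem.List.pyRange 0 (((PySem.Chars.lower text.toList).length : Int) + 1) 1).foldl
      (fun ans i =>
        if ((i == 0) || (PySem.List.pyGet? (PySem.Chars.lower text.toList) (i - 1) == some ' '))
            && (PySem.List.slice (PySem.Chars.lower text.toList) (some i)
                  (some (i + ((PySem.Chars.lower token.toList).length : Int)))
                == PySem.Chars.lower token.toList)
            && ((i + ((PySem.Chars.lower token.toList).length : Int)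
                  == ((PySem.Chars.lower text.toList).length : Int))
                || (PySem.List.pyGet? (PySem.Chars.lower text.toList)
                      (i + ((PySem.Chars.lower token.toList).length : Int)) == some ' '))
        then ans ++ [i + ((PySem.Chars.lower token.toList).length : Int)] else ans)
      [-1])
      = [-1] ++ ((PySem.List.pyRange (((0 : Nat) : Int))
            (((PySem.Chars.lower text.toList).length : Int) + 1) 1).filter
              (pvCond (PySem.Chars.lower token.toList) (PySem.Chars.lower text.toList))).map
            (fun i => i + ((PySem.Chars.lower token.toList).length : Int)) :=
        fold_if_append _ _ _ [-1]
    _ = [-1] ++ pvScan (PySem.Chars.lower token.toList) true (PySem.Chars.lower text.toList)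
          (((0 : Nat) : Int)) := by
        have h := scan_range (PySem.Chars.lower token.toList) (PySem.Chars.lower text.toList)
          (PySem.Chars.lower text.toList) 0 (by simp) (by simp)
        have hflag : ((((0 : Nat) : Int)) == 0
            || (PySem.List.pyGet? (PySem.Chars.lower text.toList) ((((0 : Nat) : Int)) - 1)
                  == some ' ')) = true := by simp
        rw [hflag] at h
        rw [h]
    _ = -1 :: pvWordEnds (PySem.Chars.lower token.toList)
          (List.splitOn ' ' (PySem.Chars.lower text.toList)) 0 := by
        rw [show (((0 : Nat) : Int)) = (0 : Int) by simp]
        rw [(scan_words (PySem.Chars.lower token.toList) ht (PySem.Chars.lower text.toList) 0).1]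
        rfl

-- ===== VERDICT (by name: the statement is the Claim_ definition above) =====
theorem all_indices_spec : Claim_equal_all_indices := by
  intro token text _
  show all_indices token text = all_indices_alt token text
  by_cases hin : PySem.Str.isIn " " token = true
  · have hmem : ' ' ∈ token.toList := by
      have h1 := (PySem.Str.isIn_iff_infix " " token).mp hin
      exact (List.singleton_infix_iff ' ' token.toList).mp (by simpa using h1)
    have htmem : ' ' ∈ PySem.Chars.lower token.toList := by
      unfold PySem.Chars.lower
      exact List.mem_map.mpr ⟨' ', hmem, (lowerChar_space ' ').mpr rfl⟩
    rw [all_indices_eq]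
    have hz : pvWordEnds (PySem.Chars.lower token.toList)
        (List.splitOn ' ' (PySem.Chars.lower text.toList)) 0 = [] := by
      apply pvWordEnds_nil
      intro w hw heq
      exact not_mem_splitOn _ w hw (heq ▸ htmem)
    rw [hz]
    unfold all_indices_alt
    rw [if_pos hin]
  · have hinF : PySem.Str.isIn " " token = false := by simpa using hin
    have hmem : ' ' ∉ token.toList := by
      intro hm
      have h2 : (" ").toList <:+: token.toList := by
        simpa using (List.singleton_infix_iff ' ' token.toList).mpr hm
      exact hin ((PySem.Str.isIn_iff_infix " " token).mpr h2)
    have ht : ' ' ∉ PySem.Chars.lower token.toList := by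
      intro hm
      obtain ⟨x, hx, hlx⟩ := List.mem_map.mp hm
      exact hmem ((lowerChar_space x).mp hlx ▸ hx)
    rw [all_indices_eq, all_indices_alt_eq token text hinF ht]
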